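-- pv_equiv track=rewrite | github.com/ajmscherer/solari | code/feeder.py | buildCharMap
-- ===== SOURCE A (Python) =====
-- def buildCharMap(panelSize, startchar=32, lastchar=126):
--     '''Build a character map for the Solari board. The character map is a dictionary that maps characters to their corresponding bitmaps. The bitmaps are represented as lists of integers, where each integer represents a line of the bitmap. The lineSize parameter is the number of characters per line in the bitmap. The startchar and lastchar parameters define the range of characters to include in the character map.
--         -lineSize: the number of characters per line in the bitmap. The default is 40, which means that the bitmap will have 40 characters per line.
--         -startchar: the ASCII code of the first character to include in the character map. The default is 32, which is the space character.
--         -lastchar: the ASCII code of the last character to include in the character map. The default is 126, which is the tilde character.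
--     '''
--
--     def display(c):
--         return "{:0>3}:{} ".format(c,chr(c))
--
--     columns, rows = panelSize
--     colCapacity = columns // len(display(startchar))
--     pageCapacity = colCapacity * rows
--
--     charRange = range(startchar, lastchar+1)
--
--     nbPages = len(charRange) // pageCapacity + 1
--
--     strings =[['' for r in range(rows)] for p in range(nbPages)]
--
--     for k, char in enumerate(charRange):
--         page = k // pageCapacity
--         row = (k % pageCapacity) % rows
--         strings[page][row]+=display(char)
--
--     strings = ['<br>'.join(strings[page]) for page in range(nbPages)]
--
--     return strings
-- ===== SOURCE B (Python) =====
-- def buildCharMap(panelSize, startchar=32, lastchar=126):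
--     """Gather-style rebuild: instead of dispatching every character into a
--     mutable page/row bucket, build each page string directly by scanning the
--     character indices that belong to each (page, row) cell."""
--
--     def display(c):
--         return "{:0>3}:{} ".format(c, chr(c))
--
--     columns, rows = panelSize
--     colCapacity = columns // len(display(startchar))
--     pageCapacity = colCapacity * rows
--
--     chars = list(range(startchar, lastchar + 1))
--     nbPages = len(chars) // pageCapacity + 1
--
--     return ['<br>'.join(
--                 ''.join(display(chars[k]) for k in range(len(chars))
--                         if k // pageCapacity == p and (k % pageCapacity) % rows == r)
--                 for r in range(rows))
--             for p in range(nbPages)]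
-- ===== Notes on version B (the rewrite author's own statement) =====
-- stated objective: alternative
-- what changed: B gathers: each page/row string is built directly by a comprehension selecting the character indices that land in that (page,row) cell, instead of A's scatter loop that mutates a pre-allocated page/row string matrix. (Pre_ also excludes character ranges containing surrogate code points, whose Python result strings are not representable as Lean Strings.)
import Mathlib
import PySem

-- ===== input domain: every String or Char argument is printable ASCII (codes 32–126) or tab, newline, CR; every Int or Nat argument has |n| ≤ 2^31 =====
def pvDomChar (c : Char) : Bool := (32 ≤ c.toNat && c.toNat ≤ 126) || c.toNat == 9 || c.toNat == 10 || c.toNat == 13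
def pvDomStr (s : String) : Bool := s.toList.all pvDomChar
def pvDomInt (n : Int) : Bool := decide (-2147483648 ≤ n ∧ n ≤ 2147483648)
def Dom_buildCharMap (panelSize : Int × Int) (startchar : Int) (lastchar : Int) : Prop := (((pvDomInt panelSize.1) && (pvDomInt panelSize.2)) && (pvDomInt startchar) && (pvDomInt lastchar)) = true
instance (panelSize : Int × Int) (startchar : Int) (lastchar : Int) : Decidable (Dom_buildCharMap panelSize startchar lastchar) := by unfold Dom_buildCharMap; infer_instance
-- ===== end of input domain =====

-- B rebuilds each page/row string by a gathering comprehension instead of A's scatter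
-- loop over a mutable matrix (objective: alternative decomposition, same results).

-- ===== PORT A =====
-- display(c) = "{:0>3}:{} ".format(c, chr(c)) as a list of code points; Char.ofNat c.toNat
-- is exact for chr(c) on the code points Pre_ admits (0 ≤ c ≤ 0x10FFFF, no surrogates)
def pvDisplay (c : Int) : List Char :=
  let digits := PySem.Int.toChars c
  List.replicate (3 - digits.length) '0' ++ digits ++ [':', Char.ofNat c.toNat, ' ']

-- A's loop body: strings[page][row] += display(char); List.modify is exact for Python's
-- item assignment at the non-negative in-bounds indices Pre_ guarantees
def pvStep (pageCapacity rows : Int) (m : List (List (List Char))) (kc : Int × Int) :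
    List (List (List Char)) :=
  m.modify (PySem.Int.floordiv kc.1 pageCapacity).toNat
    (fun rl => rl.modify (PySem.Int.mod (PySem.Int.mod kc.1 pageCapacity) rows).toNat
      (fun s => s ++ pvDisplay kc.2))

def buildCharMap (panelSize : Int × Int) (startchar : Int) (lastchar : Int) : List String :=
  let columns := panelSize.1
  let rows := panelSize.2
  let colCapacity := PySem.Int.floordiv columns ((pvDisplay startchar).length : Int)
  let pageCapacity := colCapacity * rows
  let charRange := PySem.List.pyRange startchar (lastchar + 1)
  let nbPages := PySem.Int.floordiv (charRange.length : Int) pageCapacity + 1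
  let strings0 : List (List (List Char)) :=
    List.replicate nbPages.toNat (List.replicate rows.toNat [])
  let strings := (PySem.List.enumerate charRange).foldl (pvStep pageCapacity rows) strings0
  -- ['<br>'.join(strings[page]) for page in range(nbPages)]: strings has exactly
  -- max(nbPages, 0) entries, so the comprehension is a map over strings
  strings.map (fun rl => String.ofList (PySem.Chars.join "<br>".toList rl))

-- ===== PORT B =====
def buildCharMap_alt (panelSize : Int × Int) (startchar : Int) (lastchar : Int) : List String :=
  let columns := panelSize.1
  let rows := panelSize.2
  let colCapacity := PySem.Int.floordiv columns ((pvDisplay startchar).length : Int)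
  let pageCapacity := colCapacity * rows
  let chars := PySem.List.pyRange startchar (lastchar + 1)
  let nbPages := PySem.Int.floordiv (chars.length : Int) pageCapacity + 1
  (List.range nbPages.toNat).map (fun (p : Nat) =>
    String.ofList (PySem.Chars.join "<br>".toList
      ((List.range rows.toNat).map (fun (r : Nat) =>
        ((List.range chars.length).filterMap (fun (k : Nat) =>
          if PySem.Int.floordiv (k : Int) pageCapacity = (p : Int) ∧
             PySem.Int.mod (PySem.Int.mod (k : Int) pageCapacity) rows = (r : Int)
          then some (pvDisplay (PySem.List.pyGetD chars (k : Int) 0)) else none)).flatten))))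

-- ===== PRECONDITION & SPEC =====
-- Pre_ excludes (a) inputs where A raises (chr out of range, ZeroDivisionError on
-- pageCapacity = 0, IndexError when the range is non-empty but rows < 1 or columns
-- yield no positive column capacity) and (b) character ranges containing surrogate
-- code points 0xD800-0xDFFF, where A returns strings that are not representable as
-- Lean Strings (B returns the identical Python value there).
def Pre_buildCharMap (panelSize : Int × Int) (startchar : Int) (lastchar : Int) : Prop :=
  0 ≤ startchar ∧ startchar ≤ 1114111 ∧
  ((startchar ≤ lastchar ∧ lastchar ≤ 1114111 ∧ (lastchar < 55296 ∨ 57343 < startchar) ∧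
      1 ≤ panelSize.2 ∧
      ((max 3 (PySem.Int.toChars startchar).length + 3 : Nat) : Int) ≤ panelSize.1) ∨
   (lastchar < startchar ∧
      PySem.Int.floordiv panelSize.1 ((max 3 (PySem.Int.toChars startchar).length + 3 : Nat) : Int)
        * panelSize.2 ≠ 0))

instance (panelSize : Int × Int) (startchar : Int) (lastchar : Int) :
    Decidable (Pre_buildCharMap panelSize startchar lastchar) := by
  unfold Pre_buildCharMap; infer_instance

def pvWitness_buildCharMap : (Int × Int) × Int × Int := ((40, 2), 32, 40)

def Spec_buildCharMap (panelSize : Int × Int) (startchar : Int) (lastchar : Int) (out : List String) : Prop := out = buildCharMap_alt panelSize startchar lastchar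
instance (panelSize : Int × Int) (startchar : Int) (lastchar : Int) (out : List String) : Decidable (Spec_buildCharMap panelSize startchar lastchar out) := by unfold Spec_buildCharMap; infer_instance

-- ===== CLAIM (what is proved, stated in full; the proofs are below) =====
def Claim_equal_buildCharMap : Prop := ∀ (panelSize : Int × Int) (startchar : Int) (lastchar : Int), Dom_buildCharMap panelSize startchar lastchar → Pre_buildCharMap panelSize startchar lastchar → Spec_buildCharMap panelSize startchar lastchar (buildCharMap panelSize startchar lastchar)

-- ===== LEMMAS AND PROOFS =====

theorem pvDisplay_length (c : Int) :
    (pvDisplay c).length = max 3 (PySem.Int.toChars c).length + 3 := by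
  simp [pvDisplay]; omega

theorem pv_getD_modify {α : Type} (l : List α) (i : Nat) (f : α → α) (p : Nat) (d : α) :
    (l.modify i f).getD p d =
      if i = p ∧ p < l.length then f (l.getD p d) else l.getD p d := by
  by_cases hp : p < l.length
  · have hp' : p < (l.modify i f).length := by simpa using hp
    rw [List.getD_eq_getElem _ _ hp', List.getD_eq_getElem _ _ hp, List.getElem_modify]
    by_cases hip : i = p <;> simp [hip, hp]
  · simp [hp]

theorem pvStep_length (pc rows : Int) (M : List (List (List Char))) (kc : Int × Int) :
    (pvStep pc rows M kc).length = M.length := by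
  simp [pvStep]

theorem pvStep_rowlen (pc rows : Int) (rn : Nat) (M : List (List (List Char)))
    (kc : Int × Int) (h : ∀ row ∈ M, row.length = rn) :
    ∀ row ∈ pvStep pc rows M kc, row.length = rn := by
  intro row hrow
  obtain ⟨j, hj, rfl⟩ := List.mem_iff_getElem.1 hrow
  unfold pvStep at hj ⊢
  rw [List.getElem_modify]
  split
  · rw [List.length_modify]
    exact h _ (List.getElem_mem _)
  · exact h _ (List.getElem_mem _)

theorem pvScatter (pc rows : Int) (rn : Nat) (l : List (Int × Int)) :
    ∀ (M : List (List (List Char))),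
    (∀ row ∈ M, row.length = rn) →
    (∀ kc ∈ l, (PySem.Int.floordiv kc.1 pc).toNat < M.length ∧
               (PySem.Int.mod (PySem.Int.mod kc.1 pc) rows).toNat < rn) →
    ∀ p r : Nat,
    (((l.foldl (pvStep pc rows) M).getD p []).getD r []) =
      ((M.getD p []).getD r []) ++
      (l.filter (fun kc => decide ((PySem.Int.floordiv kc.1 pc).toNat = p ∧
            (PySem.Int.mod (PySem.Int.mod kc.1 pc) rows).toNat = r))).flatMap
        (fun kc => pvDisplay kc.2) := by
  induction l with
  | nil => intro M _ _ p r; simp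
  | cons kc t ih =>
    intro M h hb p r
    have hkc := hb kc List.mem_cons_self
    have h' : ∀ row ∈ pvStep pc rows M kc, row.length = rn := pvStep_rowlen pc rows rn M kc h
    have hb' : ∀ x ∈ t, (PySem.Int.floordiv x.1 pc).toNat < (pvStep pc rows M kc).length ∧
        (PySem.Int.mod (PySem.Int.mod x.1 pc) rows).toNat < rn := by
      intro x hx
      rw [pvStep_length]
      exact hb x (List.mem_cons_of_mem _ hx)
    have hcell : (((pvStep pc rows M kc).getD p []).getD r []) =
        ((M.getD p []).getD r []) ++
          (if (PySem.Int.floordiv kc.1 pc).toNat = p ∧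
              (PySem.Int.mod (PySem.Int.mod kc.1 pc) rows).toNat = r
           then pvDisplay kc.2 else []) := by
      unfold pvStep
      rw [pv_getD_modify]
      by_cases h1 : (PySem.Int.floordiv kc.1 pc).toNat = p
      · have hpM : p < M.length := h1 ▸ hkc.1
        have hrowlen : (M.getD p []).length = rn := by
          rw [List.getD_eq_getElem _ _ hpM]
          exact h _ (List.getElem_mem _)
        rw [if_pos ⟨h1, hpM⟩, pv_getD_modify]
        by_cases h2 : (PySem.Int.mod (PySem.Int.mod kc.1 pc) rows).toNat = r
        · have hrM : r < (M.getD p []).length := by rw [hrowlen]; exact h2 ▸ hkc.2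
          rw [if_pos ⟨h2, hrM⟩, if_pos ⟨h1, h2⟩]
        · rw [if_neg (by tauto), if_neg (by tauto), List.append_nil]
      · rw [if_neg (by tauto), if_neg (by tauto), List.append_nil]
    rw [List.foldl_cons, ih _ h' hb' p r, hcell, List.filter_cons]
    by_cases hm : ((PySem.Int.floordiv kc.1 pc).toNat = p ∧
        (PySem.Int.mod (PySem.Int.mod kc.1 pc) rows).toNat = r) <;>
      simp [hm, List.append_assoc]

theorem pvFoldl_length (pc rows : Int) (l : List (Int × Int)) :
    ∀ M : List (List (List Char)), (l.foldl (pvStep pc rows) M).length = M.length := by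
  induction l with
  | nil => intro M; rfl
  | cons kc t ih => intro M; rw [List.foldl_cons, ih, pvStep_length]

theorem pvFoldl_rowlen (pc rows : Int) (rn : Nat) (l : List (Int × Int)) :
    ∀ M : List (List (List Char)), (∀ row ∈ M, row.length = rn) →
    ∀ row ∈ l.foldl (pvStep pc rows) M, row.length = rn := by
  induction l with
  | nil => intro M h; exact h
  | cons kc t ih => intro M h; exact ih _ (pvStep_rowlen pc rows rn M kc h)

theorem pvFlatMap_congr {α β : Type} {l : List α} {p q : α → Bool} {f g : α → List β}
    (hpq : ∀ x ∈ l, p x = q x) (hfg : ∀ x ∈ l.filter p, f x = g x) :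
    (l.filter p).flatMap f = (l.filter q).flatMap g := by
  rw [List.filter_congr hpq] at *
  exact List.flatMap_congr ((fun x hx => hfg x hx))

theorem pvFilterMap_if {α β : Type} (l : List α) (p : α → Prop) [DecidablePred p]
    (f : α → β) :
    (l.filterMap (fun x => if p x then some (f x) else none)) =
      (l.filter (fun x => decide (p x))).map f := by
  induction l with
  | nil => rfl
  | cons x t ih =>
    by_cases hx : p x <;> simp [hx, ih]

theorem pvEq (columns rows startchar lastchar : Int)
    (hcase : (1 ≤ rows ∧ ((pvDisplay startchar).length : Int) ≤ columns) ∨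
             lastchar < startchar) :
    buildCharMap (columns, rows) startchar lastchar =
      buildCharMap_alt (columns, rows) startchar lastchar := by
  simp only [buildCharMap, buildCharMap_alt]
  set D : Int := ((pvDisplay startchar).length : Int) with hD
  set pc : Int := PySem.Int.floordiv columns D * rows with hpcdef
  set chars : List Int := PySem.List.pyRange startchar (lastchar + 1) with hchars
  set N : Nat := (PySem.Int.floordiv (chars.length : Int) pc + 1).toNat with hNdef
  set rn : Nat := rows.toNat with hrn
  rcases hcase with ⟨hrows, hcols⟩ | hempty
  case inr =>
    -- empty character range: the loop never runs, every cell stays ''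
    have hnil : chars = [] := PySem.List.pyRange_one_eq_nil (by omega)
    rw [hnil]
    simp [PySem.List.enumerate_nil, List.map_const', List.map_replicate]
  case inl =>
    have hDpos : 0 < D := by
      rw [hD]; have := pvDisplay_length startchar; omega
    have hcc : (1 : Int) ≤ PySem.Int.floordiv columns D :=
      (PySem.Int.le_floordiv_iff_mul_le hDpos).2 (by omega)
    have hpc : 0 < pc := by
      rw [hpcdef]; nlinarith
    have hrowsnn : 0 < rn := by omega
    have hrows0 : ∀ row ∈ List.replicate N (List.replicate rn ([] : List Char)),
        row.length = rn := by
      intro row h; rw [List.eq_of_mem_replicate h, List.length_replicate]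
    have hfdnn : ∀ k : Int, 0 ≤ k → 0 ≤ PySem.Int.floordiv k pc := by
      intro k hk
      rw [PySem.Int.floordiv_eq_ediv_of_pos hpc]
      exact Int.ediv_nonneg hk (le_of_lt hpc)
    have hb : ∀ kc ∈ PySem.List.enumerate chars,
        (PySem.Int.floordiv kc.1 pc).toNat < (List.replicate N (List.replicate rn ([] : List Char))).length ∧
        (PySem.Int.mod (PySem.Int.mod kc.1 pc) rows).toNat < rn := by
      intro kc hkc
      obtain ⟨k, hk, rfl⟩ := (PySem.List.mem_enumerate_iff _ _ _).1 hkc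
      dsimp only
      constructor
      · have hle : PySem.Int.floordiv ((0 : Int) + k) pc ≤
            PySem.Int.floordiv (chars.length : Int) pc := by
          rw [PySem.Int.floordiv_eq_ediv_of_pos hpc, PySem.Int.floordiv_eq_ediv_of_pos hpc]
          exact Int.ediv_le_ediv hpc (by omega)
        have hnn := hfdnn ((0 : Int) + k) (by omega)
        rw [List.length_replicate]
        omega
      · have h1 := PySem.Int.mod_nonneg (PySem.Int.mod ((0 : Int) + k) pc) hrows
        have h2 := PySem.Int.mod_lt (PySem.Int.mod ((0 : Int) + k) pc) hrows
        omega
    apply List.ext_getElem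
    · simp [pvFoldl_length]
    intro p hp hp'
    simp only [List.getElem_map, List.getElem_range]
    apply congrArg
    apply congrArg
    have hlenS : ((PySem.List.enumerate chars).foldl (pvStep pc rows)
        (List.replicate N (List.replicate rn ([] : List Char)))).length = N := by
      rw [pvFoldl_length, List.length_replicate]
    have hpN : p < N := by
      have h := hp
      simp only [List.length_map] at h
      rwa [hlenS] at h
    apply List.ext_getElem
    · simp only [List.length_map, List.length_range]
      exact pvFoldl_rowlen pc rows rn _ _ hrows0 _ (List.getElem_mem _)
    intro r hr hr'
    have hrrn : r < rn := by simpa using hr'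
    -- left side: the scattered cell
    have e1 : ((PySem.List.enumerate chars).foldl (pvStep pc rows)
          (List.replicate N (List.replicate rn ([] : List Char)))).getD p [] =
        ((PySem.List.enumerate chars).foldl (pvStep pc rows)
          (List.replicate N (List.replicate rn ([] : List Char))))[p]'(by rw [hlenS]; exact hpN) :=
      List.getD_eq_getElem _ _ _
    have e2 := List.getD_eq_getElem (((PySem.List.enumerate chars).foldl (pvStep pc rows)
          (List.replicate N (List.replicate rn ([] : List Char))))[p]'(by rw [hlenS]; exact hpN)) ([] : List Char) (n := r) (by
        rw [pvFoldl_rowlen pc rows rn _ _ hrows0 _ (List.getElem_mem _)]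
        exact hrrn)
    have hcell := pvScatter pc rows rn (PySem.List.enumerate chars) _ hrows0 hb p r
    rw [e1, e2] at hcell
    simp only [List.getElem_map, List.getElem_range]
    rw [hcell]
    -- the start matrix cell is ''
    have hz : ((List.replicate N (List.replicate rn ([] : List Char))).getD p []).getD r [] =
        ([] : List Char) := by
      have hin : (List.replicate N (List.replicate rn ([] : List Char))).getD p [] =
          List.replicate rn ([] : List Char) := by
        rw [List.getD_eq_getElem _ _ (by rw [List.length_replicate]; exact hpN),
          List.getElem_replicate]
      rw [hin, List.getD_eq_getElem _ _ (by rw [List.length_replicate]; exact hrrn),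
        List.getElem_replicate]
    rw [hz, List.nil_append]
    -- right side: turn the comprehension into a flatMap over the same filtered indices
    rw [pvFilterMap_if (List.range chars.length)
        (fun k => PySem.Int.floordiv (k : Int) pc = (p : Int) ∧
          PySem.Int.mod (PySem.Int.mod (k : Int) pc) rows = (r : Int))
        (fun k => pvDisplay (PySem.List.pyGetD chars (k : Int) 0)),
      ← List.flatMap_def]
    -- left side: enumerate as a map over range
    rw [PySem.List.enumerate_eq_map_pyRange chars 0]
    rw [show PySem.List.len chars = ((chars.length : Nat) : Int) from by simp,
      PySem.List.pyRange_zero_nat, List.map_map, List.filter_map, List.flatMap_map]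
    apply pvFlatMap_congr
    · intro k hk
      have hknn : (0 : Int) ≤ (k : Int) := by omega
      simp only [Function.comp, decide_eq_decide]
      have h1 := hfdnn (k : Int) hknn
      have h2 := PySem.Int.mod_nonneg (PySem.Int.mod (k : Int) pc) hrows
      omega
    · intro k hk
      rfl

-- ===== VERDICT (by name: the statement is the Claim_ definition above) =====
theorem buildCharMap_spec : Claim_equal_buildCharMap := by
  intro panelSize startchar lastchar _ hpre
  obtain ⟨columns, rows⟩ := panelSize
  unfold Spec_buildCharMap
  obtain ⟨hs0, hs1, hcase⟩ := hpre
  apply pvEq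
  rcases hcase with ⟨_, _, _, hr, hc⟩ | ⟨he, _⟩
  · left
    refine ⟨hr, ?_⟩
    rw [pvDisplay_length]
    exact_mod_cast hc
  · right; exact he
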